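-- pv_equiv track=rewrite | github.com/sahaia1/coursera_algos | algorithmic toolbox/week6_dynamic_programming2/3_maximum_value_of_an_arithmetic_expression/placing_parentheses.py | split_numbers_ops
-- ===== SOURCE A (Python) =====
-- def split_numbers_ops(string):
--     isNumber = False
--     nums = []
--     ops = []
--     number = 0
--     for e in string:
--         try:
--             if isNumber:
--                 number = number * 10 + int(e)
--             else:
--                 isNumber = True
--                 number = int(e)
--         except ValueError:
--             nums.append(number)
--             ops.append(e)
--             number = 0
--             isNumber = False
--     nums.append(number)
--
--     return nums, ops
-- ===== SOURCE B (Python) =====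
-- def split_numbers_ops(string):
--     # two passes: ops by a filter; nums built back-to-front with place values
--     ops = [c for c in string if not c.isdigit()]
--     nums = [0]
--     place = 1
--     for c in reversed(string):
--         if c.isdigit():
--             nums[-1] += (ord(c) - 48) * place
--             place *= 10
--         else:
--             nums.append(0)
--             place = 1
--     nums.reverse()
--     return nums, ops
-- ===== Notes on version B (the rewrite author's own statement) =====
-- stated objective: alternative
-- what changed: Replaced A's single forward try/except state machine (flag + number=number*10+int(e)) by two independent passes: a filter comprehension collecting the operators, and a reversed traversal that accumulates each number back-to-front with an explicit place-value multiplier.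
import Mathlib
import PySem

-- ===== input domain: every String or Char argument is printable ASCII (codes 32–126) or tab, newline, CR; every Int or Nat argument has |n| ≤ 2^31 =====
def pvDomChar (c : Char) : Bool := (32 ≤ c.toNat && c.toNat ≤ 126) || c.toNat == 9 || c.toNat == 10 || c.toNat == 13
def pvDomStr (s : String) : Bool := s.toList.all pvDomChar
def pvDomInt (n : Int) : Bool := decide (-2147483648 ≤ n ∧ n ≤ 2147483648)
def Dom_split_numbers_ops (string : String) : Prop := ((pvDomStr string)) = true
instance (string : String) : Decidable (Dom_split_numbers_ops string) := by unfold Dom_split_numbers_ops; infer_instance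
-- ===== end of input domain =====

-- B replaces A's forward try/except state machine by two passes: a filter for the
-- operators and a reversed pass accumulating each number with place values (alternative, same cost).

-- ===== PORT A =====
-- the for-loop of A, state (isNumber, nums, ops, number); int(e) is PySem.Int.ofChars?,
-- the except branch is its 'none' case
def splitLoopA : List Char → Bool → List Int → List String → Int → List Int × List String
  | [], _, nums, ops, number => (nums ++ [number], ops)
  | e :: rest, isNumber, nums, ops, number =>
    match PySem.Int.ofChars? [e] with
    | some d =>
      if isNumber then splitLoopA rest true nums ops (number * 10 + d)
      else splitLoopA rest true nums ops d
    | none => splitLoopA rest false (nums ++ [number]) (ops ++ [String.ofList [e]]) 0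

def split_numbers_ops (string : String) : List Int × List String :=
  splitLoopA string.toList false [] [] 0

-- ===== PORT B =====
-- nums[-1] += … is pySetD/pyGetD at index -1; 'for c in reversed(string)' is a foldl over the
-- reversed character list; the final nums.reverse() is .reverse
def split_numbers_ops_alt (string : String) : List Int × List String :=
  ((string.toList.reverse.foldl (fun (st : List Int × Int) c =>
      if PySem.Str.isdigit c then
        (PySem.List.pySetD st.1 (-1) (PySem.List.pyGetD st.1 (-1) 0 + ((c.toNat : Int) - 48) * st.2), st.2 * 10)
      else (st.1 ++ [(0 : Int)], 1)) ([(0 : Int)], (1 : Int))).1.reverse,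
   (string.toList.filter (fun c => !PySem.Str.isdigit c)).map (fun c => String.ofList [c]))

-- ===== PRECONDITION & SPEC =====
def Spec_split_numbers_ops (string : String) (out : List Int × List String) : Prop := out = split_numbers_ops_alt string
instance (string : String) (out : List Int × List String) : Decidable (Spec_split_numbers_ops string out) := by unfold Spec_split_numbers_ops; infer_instance

-- ===== CLAIM (what is proved, stated in full; the proofs are below) =====
def Claim_equal_split_numbers_ops : Prop := ∀ (string : String), Dom_split_numbers_ops string → Spec_split_numbers_ops string (split_numbers_ops string)

-- ===== LEMMAS AND PROOFS =====

-- reference decomposition: segment values left-to-right, operators, leading digit-run length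
def segNums : List Char → Int → List Int
  | [], a => [a]
  | c :: cs, a =>
    if PySem.Str.isdigit c then segNums cs (a * 10 + ((c.toNat : Int) - 48))
    else a :: segNums cs 0

def segOps : List Char → List String
  | [] => []
  | c :: cs => if PySem.Str.isdigit c then segOps cs else String.ofList [c] :: segOps cs

def runLen : List Char → Nat
  | [] => 0
  | c :: cs => if PySem.Str.isdigit c then runLen cs + 1 else 0

-- int(e) on a single domain character: a value exactly on the digits '0'-'9'
lemma ofChars_single (c : Char) (h : pvDomChar c = true) :
    PySem.Int.ofChars? [c]
      = if PySem.Str.isdigit c then some ((c.toNat : Int) - 48) else none := by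
  have hb : ∀ n, n < 127 → PySem.Int.ofChars? [Char.ofNat n]
      = if PySem.Str.isdigit (Char.ofNat n) then some (((Char.ofNat n).toNat : Int) - 48) else none := by
    decide
  have hc : c.toNat < 127 := by
    simp only [pvDomChar, Bool.or_eq_true, Bool.and_eq_true, decide_eq_true_eq, beq_iff_eq] at h
    omega
  have := hb c.toNat hc
  rwa [Char.ofNat_toNat] at this

-- A's loop computes the segment decomposition, for both flag states
lemma splitLoopA_spec (cs : List Char) (hd : ∀ c ∈ cs, pvDomChar c = true) :
    (∀ nums ops number,
        splitLoopA cs true nums ops number = (nums ++ segNums cs number, ops ++ segOps cs))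
    ∧ (∀ nums ops,
        splitLoopA cs false nums ops 0 = (nums ++ segNums cs 0, ops ++ segOps cs)) := by
  induction cs with
  | nil => simp [splitLoopA, segNums, segOps]
  | cons c cs ih =>
    have hc := hd c (by simp)
    have ih' := ih (fun x hx => hd x (by simp [hx]))
    constructor
    · intro nums ops number
      simp only [splitLoopA, ofChars_single c hc]
      by_cases h : PySem.Str.isdigit c
      · simp [h, segNums, segOps, ih'.1]
      · simp [h, segNums, segOps, ih'.2]
    · intro nums ops
      simp only [splitLoopA, ofChars_single c hc]
      by_cases h : PySem.Str.isdigit c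
      · simp [h, segNums, segOps, ih'.1]
      · simp [h, segNums, segOps, ih'.2]

-- head of segNums: the accumulator weighs 10^(leading run length)
lemma segNums_head (cs : List Char) : ∀ a,
    segNums cs a = (a * 10 ^ runLen cs + (segNums cs 0).headI) :: (segNums cs 0).tail := by
  induction cs with
  | nil => intro a; simp [segNums, runLen]
  | cons c cs ih =>
    intro a
    by_cases h : PySem.Str.isdigit c
    · simp only [segNums, runLen, h, if_pos]
      rw [ih (a * 10 + ((c.toNat : Int) - 48)), ih ((0 : Int) * 10 + ((c.toNat : Int) - 48))]
      simp [pow_succ]; ring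
    · simp [segNums, runLen, h]

lemma pySetD_append_neg_one {α : Type} (xs : List α) (a v : α) :
    PySem.List.pySetD (xs ++ [a]) (-1) v = xs ++ [v] := by
  simp [PySem.List.pySetD, PySem.List.pySet?, PySem.List.pyIdx?]

-- B's reversed fold computes the reversed segment values plus the current place value
lemma foldB_spec (cs : List Char) :
    cs.reverse.foldl (fun (st : List Int × Int) c =>
      if PySem.Str.isdigit c then
        (PySem.List.pySetD st.1 (-1) (PySem.List.pyGetD st.1 (-1) 0 + ((c.toNat : Int) - 48) * st.2), st.2 * 10)
      else (st.1 ++ [(0 : Int)], 1)) ([(0 : Int)], (1 : Int))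
    = ((segNums cs 0).reverse, 10 ^ runLen cs) := by
  induction cs with
  | nil => simp [segNums, runLen]
  | cons c cs ih =>
    rw [List.reverse_cons, List.foldl_append, ih]
    by_cases h : PySem.Str.isdigit c
    · have h0 := segNums_head cs 0
      have hv := segNums_head cs ((0 : Int) * 10 + ((c.toNat : Int) - 48))
      simp only [List.foldl_cons, List.foldl_nil, h, if_pos]
      rw [h0]
      simp only [zero_mul, zero_add, List.reverse_cons,
        PySem.List.pyGetD_neg_one_append_singleton, pySetD_append_neg_one]
      simp only [segNums, runLen, h, if_pos, hv]
      rw [Prod.mk.injEq]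
      refine ⟨?_, by rw [pow_succ]⟩
      rw [List.reverse_cons]
      congr 2
      ring
    · simp [h, segNums, runLen]

-- B's operator pass equals the reference operators
lemma opsB_spec (cs : List Char) :
    (cs.filter (fun c => !PySem.Str.isdigit c)).map (fun c => String.ofList [c]) = segOps cs := by
  induction cs with
  | nil => simp [segOps]
  | cons c cs ih =>
    by_cases h : PySem.Str.isdigit c <;> simp [segOps, h, ih]

-- ===== VERDICT (by name: the statement is the Claim_ definition above) =====
theorem split_numbers_ops_spec : Claim_equal_split_numbers_ops := by
  intro string hdom
  unfold Spec_split_numbers_ops split_numbers_ops split_numbers_ops_alt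
  have hd : ∀ c ∈ string.toList, pvDomChar c = true := by
    simpa [Dom_split_numbers_ops, pvDomStr, List.all_eq_true] using hdom
  rw [(splitLoopA_spec string.toList hd).2 [] []]
  rw [foldB_spec, opsB_spec]
  simp
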